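-- pv_equiv track=rewrite | github.com/TakashiSasaki/Hide-Android-Apps | source/utils.py | diffLists
-- ===== SOURCE A (Python) =====
-- def diffLists(list1, list2):
--     list1 = set(list1)
--     list2 = set(list2)
--     list1only = set()
--     list2only = set()
--     both = set()
--     for l1 in list1:
--         if l1 in list2:
--             both.add(l1)
--         else:
--             list1only.add(l1)
--     for l2 in list2:
--         if l2 in list1:
--             both.add(l2)
--         else:
--             list2only.add(l2)
--     return (list1only, both, list2only)
-- ===== SOURCE B (Python) =====
-- def diffLists(list1, list2):
--     # One status map instead of two classifying loops: tag each element with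
--     # 1 (seen only in list1), 2 (only in list2) or 3 (seen in both), then
--     # bucket the tagged keys into the three result sets in a single pass.
--     status = {}
--     for x in list1:
--         status[x] = 1
--     for y in list2:
--         v = status.get(y)
--         if v is None:
--             status[y] = 2
--         elif v == 1:
--             status[y] = 3
--     list1only, both, list2only = set(), set(), set()
--     for k, v in status.items():
--         if v == 1:
--             list1only.add(k)
--         elif v == 3:
--             both.add(k)
--         else:
--             list2only.add(k)
--     return (list1only, both, list2only)
-- ===== Notes on version B (the rewrite author's own statement) =====
-- stated objective: alternative
-- what changed: Replaces A's two set-classifying loops with membership tests by a single status dictionary that tags each element 1/2/3 (list1-only / list2-only / both) while scanning the inputs, followed by one bucketing pass over the dictionary's items.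
import Mathlib
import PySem

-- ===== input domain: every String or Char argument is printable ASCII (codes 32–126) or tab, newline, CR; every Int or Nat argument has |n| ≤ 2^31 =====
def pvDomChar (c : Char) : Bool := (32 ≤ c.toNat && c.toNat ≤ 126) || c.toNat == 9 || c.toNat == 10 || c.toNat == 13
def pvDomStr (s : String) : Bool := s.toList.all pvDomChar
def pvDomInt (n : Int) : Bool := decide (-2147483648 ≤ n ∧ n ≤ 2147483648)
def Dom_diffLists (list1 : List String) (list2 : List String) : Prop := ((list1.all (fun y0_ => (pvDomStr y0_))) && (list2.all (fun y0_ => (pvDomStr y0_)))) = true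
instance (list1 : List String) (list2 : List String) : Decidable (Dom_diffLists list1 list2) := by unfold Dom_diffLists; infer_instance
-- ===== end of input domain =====

-- B replaces A's two classifying loops over sets by a status dictionary (tag 1/2/3 per
-- element) built while scanning the inputs, then one bucketing pass over its items.


-- ===== PORT A =====
-- Python iterates over the two SETS; iteration order is not modelled, but every output is
-- itself a Set, so the result (as a set) does not depend on that order: we fold in
-- first-insertion order. Loop state is the pair of the two sets each loop mutates.
def diffLists (list1 : List String) (list2 : List String) : List String × List String × List String :=
  let s1 : PySem.Set String := PySem.Set.ofList list1
  let s2 : PySem.Set String := PySem.Set.ofList list2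
  -- for l1 in list1: if l1 in list2: both.add(l1) else: list1only.add(l1)
  let p1 := s1.foldl (fun (p : PySem.Set String × PySem.Set String) l1 =>
      if PySem.Set.contains s2 l1 then (PySem.Set.add p.1 l1, p.2)
      else (p.1, PySem.Set.add p.2 l1)) (PySem.Set.empty, PySem.Set.empty)
  -- for l2 in list2: if l2 in list1: both.add(l2) else: list2only.add(l2)
  let p2 := s2.foldl (fun (p : PySem.Set String × PySem.Set String) l2 =>
      if PySem.Set.contains s1 l2 then (PySem.Set.add p.1 l2, p.2)
      else (p.1, PySem.Set.add p.2 l2)) (p1.1, PySem.Set.empty)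
  (p1.2, p2.1, p2.2)

-- ===== PORT B =====
def diffLists_alt (list1 : List String) (list2 : List String) : List String × List String × List String :=
  -- status = {}; for x in list1: status[x] = 1
  let status1 : PySem.Dict String Int :=
    list1.foldl (fun d x => d.insert x (1 : Int)) PySem.Dict.empty
  -- for y in list2: v = status.get(y); if v is None: status[y] = 2; elif v == 1: status[y] = 3
  let status2 : PySem.Dict String Int :=
    list2.foldl (fun d y =>
      match d.get? y with
      | none => d.insert y (2 : Int)
      | some v => if v == 1 then d.insert y (3 : Int) else d) status1
  -- for k, v in status.items(): bucket k by v
  status2.items.foldl (fun (acc : List String × List String × List String) kv =>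
      if kv.2 == 1 then (PySem.Set.add acc.1 kv.1, acc.2.1, acc.2.2)
      else if kv.2 == 3 then (acc.1, PySem.Set.add acc.2.1 kv.1, acc.2.2)
      else (acc.1, acc.2.1, PySem.Set.add acc.2.2 kv.1))
    (PySem.Set.empty, PySem.Set.empty, PySem.Set.empty)

-- ===== PRECONDITION & SPEC =====
def Spec_diffLists (list1 : List String) (list2 : List String) (out : List String × List String × List String) : Prop := out = diffLists_alt list1 list2
instance (list1 : List String) (list2 : List String) (out : List String × List String × List String) : Decidable (Spec_diffLists list1 list2 out) := by unfold Spec_diffLists; infer_instance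

-- ===== CLAIM (what is proved, stated in full; the proofs are below) =====
def Claim_equal_diffLists : Prop := ∀ (list1 : List String) (list2 : List String), Dom_diffLists list1 list2 → Spec_diffLists list1 list2 (diffLists list1 list2)

-- ===== LEMMAS AND PROOFS =====

-- A's first loop: classifying a duplicate-free list whose elements are fresh to both
-- accumulators appends the matching / non-matching elements to them.
theorem pv_loop_classify (t : List String) :
    ∀ (s b o : List String), s.Nodup → (∀ x ∈ s, x ∉ b) → (∀ x ∈ s, x ∉ o) →
    s.foldl (fun (p : PySem.Set String × PySem.Set String) x =>
        if PySem.Set.contains t x then (PySem.Set.add p.1 x, p.2)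
        else (p.1, PySem.Set.add p.2 x)) (b, o)
      = (b ++ s.filter (fun x => PySem.Set.contains t x),
         o ++ s.filter (fun x => !PySem.Set.contains t x)) := by
  intro s
  induction s with
  | nil => intro b o _ _ _; simp
  | cons x s ih =>
    intro b o hnd hb ho
    have hxs : x ∉ s := (List.nodup_cons.mp hnd).1
    have hnd' : s.Nodup := (List.nodup_cons.mp hnd).2
    by_cases hc : PySem.Set.contains t x = true
    · simp only [List.foldl_cons, hc, if_true]
      rw [PySem.Set.add_of_not_mem (hb x (by simp))]
      rw [ih (b ++ [x]) o hnd'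
        (fun y hy => by
          simp only [List.mem_append, List.mem_singleton]
          rintro (h | rfl)
          · exact hb y (List.mem_cons_of_mem _ hy) h
          · exact hxs hy)
        (fun y hy => ho y (List.mem_cons_of_mem _ hy))]
      have hm : x ∈ t := by simpa [PySem.Set.contains] using hc
      simp [hm]
    · simp only [List.foldl_cons, hc, Bool.false_eq_true, if_false]
      rw [PySem.Set.add_of_not_mem (ho x (by simp))]
      rw [ih b (o ++ [x]) hnd'
        (fun y hy => hb y (List.mem_cons_of_mem _ hy))
        (fun y hy => by
          simp only [List.mem_append, List.mem_singleton]
          rintro (h | rfl)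
          · exact ho y (List.mem_cons_of_mem _ hy) h
          · exact hxs hy)]
      have hm : x ∉ t := by simpa [PySem.Set.contains] using hc
      simp [hm]

-- A's second loop: every element that tests positive is already in the first accumulator,
-- so only the negative branch contributes.
theorem pv_loop_only_neg (t : List String) :
    ∀ (s b o : List String), s.Nodup → (∀ x ∈ s, PySem.Set.contains t x = true → x ∈ b) →
    (∀ x ∈ s, x ∉ o) →
    s.foldl (fun (p : PySem.Set String × PySem.Set String) x =>
        if PySem.Set.contains t x then (PySem.Set.add p.1 x, p.2)
        else (p.1, PySem.Set.add p.2 x)) (b, o)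
      = (b, o ++ s.filter (fun x => !PySem.Set.contains t x)) := by
  intro s
  induction s with
  | nil => intro b o _ _ _; simp
  | cons x s ih =>
    intro b o hnd hb ho
    have hxs : x ∉ s := (List.nodup_cons.mp hnd).1
    have hnd' : s.Nodup := (List.nodup_cons.mp hnd).2
    by_cases hc : PySem.Set.contains t x = true
    · simp only [List.foldl_cons, hc, if_true]
      rw [PySem.Set.add_of_mem (hb x (by simp) hc)]
      rw [ih b o hnd'
        (fun y hy => hb y (List.mem_cons_of_mem _ hy))
        (fun y hy => ho y (List.mem_cons_of_mem _ hy))]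
      have hm : x ∈ t := by simpa [PySem.Set.contains] using hc
      simp [hm]
    · simp only [List.foldl_cons, hc, Bool.false_eq_true, if_false]
      rw [PySem.Set.add_of_not_mem (ho x (by simp))]
      rw [ih b (o ++ [x]) hnd'
        (fun y hy => hb y (List.mem_cons_of_mem _ hy))
        (fun y hy => by
          simp only [List.mem_append, List.mem_singleton]
          rintro (h | rfl)
          · exact ho y (List.mem_cons_of_mem _ hy) h
          · exact hxs hy)]
      have hm : x ∉ t := by simpa [PySem.Set.contains] using hc
      simp [hm]

-- get? on a dict whose items are a map over distinct-or-not keys: first match wins,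
-- and the matched key equals the queried key, so the value function may be applied to it.
theorem pv_get_map (us : List String) (g : String → Int) (y : String) :
    (PySem.Dict.mk (us.map (fun x => (x, g x)))).get? y
      = if y ∈ us then some (g y) else none := by
  induction us with
  | nil => simp [PySem.Dict.get?]
  | cons x us ih =>
    simp only [List.map_cons, PySem.Dict.get?_mk_cons, ih]
    by_cases h : x = y
    · subst h; simp
    · simp [h, Ne.symm h]

-- get? on the two-zone dict used by B's second loop.
theorem pv_get_mk (u w : List String) (f : String → Int) (y : String) :
    (PySem.Dict.mk (u.map (fun x => (x, f x)) ++ w.map (fun x => (x, (2:Int))))).get? y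
      = if y ∈ u then some (f y) else if y ∈ w then some 2 else none := by
  induction u with
  | nil => simpa using pv_get_map w (fun _ => (2:Int)) y
  | cons x u ih =>
    simp only [List.map_cons, List.cons_append, PySem.Dict.get?_mk_cons, ih]
    by_cases h : x = y
    · subst h; simp
    · simp [h, Ne.symm h]

-- B's first loop: inserting 1 for every element of l produces the dict whose keys are
-- the first-occurrence dedup, all tagged 1.
theorem pv_build1 : ∀ (l u : List String),
    l.foldl (fun d x => d.insert x (1:Int))
      (PySem.Dict.mk (u.map (fun x => (x, (1:Int)))))
      = PySem.Dict.mk ((PySem.Set.update u l).map (fun x => (x, (1:Int)))) := by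
  intro l
  induction l with
  | nil => intro u; simp [PySem.Set.update]
  | cons x l ih =>
    intro u
    by_cases hx : x ∈ u
    · have hc : (PySem.Dict.mk (u.map (fun a => (a, (1:Int))))).contains x = true := by
        simp only [PySem.Dict.contains_mk, List.any_map, Function.comp, List.any_eq_true,
          beq_iff_eq]
        exact ⟨x, hx, rfl⟩
      have hins : (PySem.Dict.mk (u.map (fun a => (a, (1:Int))))).insert x (1:Int)
          = PySem.Dict.mk (u.map (fun a => (a, (1:Int)))) := by
        apply PySem.Dict.ext
        rw [PySem.Dict.items_insert_of_contains _ _ hc]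
        simp only [List.map_map]
        apply List.map_congr_left
        intro a _
        by_cases h : a = x
        · subst h; simp
        · simp [h]
      simp only [List.foldl_cons, hins, ih u]
      rw [show PySem.Set.update u (x :: l) = PySem.Set.update u l from by
        simp [PySem.Set.update, PySem.Set.add_of_mem hx]]
    · have hc : (PySem.Dict.mk (u.map (fun a => (a, (1:Int))))).contains x = false := by
        simp only [PySem.Dict.contains_mk, List.any_map, Function.comp, List.any_eq_true,
          beq_iff_eq, Bool.eq_false_iff, ne_eq, not_exists, not_and]
        intro a ha hax
        exact absurd (hax ▸ ha) hx
      have hins : (PySem.Dict.mk (u.map (fun a => (a, (1:Int))))).insert x (1:Int)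
          = PySem.Dict.mk ((u ++ [x]).map (fun a => (a, (1:Int)))) := by
        apply PySem.Dict.ext
        rw [PySem.Dict.items_insert_of_not_contains _ _ hc]
        simp
      simp only [List.foldl_cons, hins, ih (u ++ [x])]
      rw [show PySem.Set.update (u ++ [x]) l = PySem.Set.update u (x :: l) from by
        simp [PySem.Set.update, PySem.Set.add_of_not_mem hx]]

-- B's second loop: keys of list1 keep tag 1 or get promoted to 3 exactly when they occur
-- in the remaining input; fresh keys of list2 are appended with tag 2.
theorem pv_build2 : ∀ (l : List String) (p : String → Bool) (u w : List String),
    (u ++ w).Nodup →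
    l.foldl (fun d y =>
        match d.get? y with
        | none => d.insert y (2:Int)
        | some v => if v == 1 then d.insert y (3:Int) else d)
      (PySem.Dict.mk (u.map (fun x => (x, if p x then (3:Int) else 1))
                      ++ w.map (fun x => (x, (2:Int)))))
      = PySem.Dict.mk (u.map (fun x => (x, if p x || decide (x ∈ l) then (3:Int) else 1))
          ++ (PySem.Set.update w (l.filter (fun y => decide (y ∉ u)))).map
              (fun x => (x, (2:Int)))) := by
  intro l
  induction l with
  | nil =>
    intro p u w _
    simp [PySem.Set.update]
  | cons y l ih =>
    intro p u w hnd
    simp only [List.foldl_cons]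
    rw [pv_get_mk u w (fun x => if p x then (3:Int) else 1) y]
    by_cases hyu : y ∈ u
    · rw [if_pos hyu]
      by_cases hpy : p y = true
      · -- value 3: dict unchanged
        simp only [hpy, if_true, Int.reduceBEq, Bool.false_eq_true, if_false]
        rw [ih p u w hnd]
        congr 1
        congr 1
        · apply List.map_congr_left
          intro a _
          by_cases ha : a = y
          · subst ha; simp [hpy]
          · simp [ha]
        · congr 2
          simp [hyu]
      · -- value 1: promote y to 3
        have hpy' : p y = false := by simpa using hpy
        simp only [hpy', Bool.false_eq_true, if_false, Int.reduceBEq, if_true]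
        have hc : (PySem.Dict.mk (u.map (fun x => (x, if p x then (3:Int) else 1))
            ++ w.map (fun x => (x, (2:Int))))).contains y = true := by
          simp only [PySem.Dict.contains_mk, List.any_append, List.any_map, Function.comp,
            List.any_eq_true, beq_iff_eq, Bool.or_eq_true]
          exact Or.inl ⟨y, hyu, rfl⟩
        have hins : (PySem.Dict.mk (u.map (fun x => (x, if p x then (3:Int) else 1))
              ++ w.map (fun x => (x, (2:Int))))).insert y (3:Int)
            = PySem.Dict.mk (u.map (fun x => (x, if (p x || x == y) then (3:Int) else 1))
                ++ w.map (fun x => (x, (2:Int)))) := by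
          apply PySem.Dict.ext
          rw [PySem.Dict.items_insert_of_contains _ _ hc]
          have hdisj : ∀ a ∈ w, a ≠ y := by
            intro a ha
            have hdj := (List.nodup_append.mp hnd).2.2
            intro h; exact hdj y hyu a ha h.symm
          simp only [List.map_append, List.map_map]
          congr 1
          · apply List.map_congr_left
            intro a _
            by_cases ha : a = y
            · subst ha; simp [hpy']
            · simp [ha]
          · apply List.map_congr_left
            intro a ha
            simp [hdisj a ha]
        rw [hins, ih (fun x => p x || x == y) u w hnd]
        congr 1
        congr 1
        · apply List.map_congr_left
          intro a _
          by_cases ha : a = y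
          · subst ha; simp
          · simp [ha]
        · congr 2
          simp [hyu]
    · rw [if_neg hyu]
      by_cases hyw : y ∈ w
      · -- tag 2 already: dict unchanged
        simp only [if_pos hyw, Int.reduceBEq, Bool.false_eq_true, if_false]
        rw [ih p u w hnd]
        congr 1
        congr 1
        · apply List.map_congr_left
          intro a hau
          have hay : a ≠ y := fun h => hyu (h ▸ hau)
          simp [hay]
        · congr 1
          rw [show (y :: l).filter (fun a => decide (a ∉ u)) =
                y :: l.filter (fun a => decide (a ∉ u)) from by simp [hyu]]
          simp [PySem.Set.update, PySem.Set.add_of_mem hyw]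
      · -- fresh key: append with tag 2
        simp only [if_neg hyw]
        have hc : (PySem.Dict.mk (u.map (fun x => (x, if p x then (3:Int) else 1))
            ++ w.map (fun x => (x, (2:Int))))).contains y = false := by
          simp only [PySem.Dict.contains_mk, List.any_append, List.any_map, Function.comp,
            beq_iff_eq, Bool.or_eq_false_iff, List.any_eq_false]
          constructor
          · intro a ha hay; exact hyu (hay ▸ ha)
          · intro a ha hay; exact hyw (hay ▸ ha)
        have hins : (PySem.Dict.mk (u.map (fun x => (x, if p x then (3:Int) else 1))
              ++ w.map (fun x => (x, (2:Int))))).insert y (2:Int)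
            = PySem.Dict.mk (u.map (fun x => (x, if p x then (3:Int) else 1))
                ++ (w ++ [y]).map (fun x => (x, (2:Int)))) := by
          apply PySem.Dict.ext
          rw [PySem.Dict.items_insert_of_not_contains _ _ hc]
          simp
        have hnd' : (u ++ (w ++ [y])).Nodup := by
          rw [← List.append_assoc]
          refine List.Nodup.append hnd (by simp) ?_
          intro a ha hb
          simp only [List.mem_singleton] at hb
          subst hb
          rcases List.mem_append.mp ha with h | h
          · exact hyu h
          · exact hyw h
        rw [hins, ih p u (w ++ [y]) hnd']
        congr 1
        congr 1
        · apply List.map_congr_left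
          intro a hau
          have hay : a ≠ y := fun h => hyu (h ▸ hau)
          simp [hay]
        · congr 1
          rw [show (y :: l).filter (fun a => decide (a ∉ u)) =
                y :: l.filter (fun a => decide (a ∉ u)) from by simp [hyu]]
          simp [PySem.Set.update, PySem.Set.add_of_not_mem hyw]

-- B's bucketing pass: with duplicate-free keys fresh to all three accumulators, the fold
-- appends each key to the bucket selected by its tag.
theorem pv_bucket : ∀ (ps : List (String × Int)) (a b c : List String),
    (∀ q ∈ ps, q.1 ∉ a ∧ q.1 ∉ b ∧ q.1 ∉ c) → (ps.map Prod.fst).Nodup →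
    ps.foldl (fun (acc : List String × List String × List String) kv =>
        if kv.2 == 1 then (PySem.Set.add acc.1 kv.1, acc.2.1, acc.2.2)
        else if kv.2 == 3 then (acc.1, PySem.Set.add acc.2.1 kv.1, acc.2.2)
        else (acc.1, acc.2.1, PySem.Set.add acc.2.2 kv.1)) (a, b, c)
      = (a ++ (ps.filter (fun q => q.2 == 1)).map Prod.fst,
         b ++ (ps.filter (fun q => q.2 == 3)).map Prod.fst,
         c ++ (ps.filter (fun q => !(q.2 == 1) && !(q.2 == 3))).map Prod.fst) := by
  intro ps
  induction ps with
  | nil => intro a b c _ _; simp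
  | cons q ps ih =>
    intro a b c hfresh hnd
    obtain ⟨k, v⟩ := q
    have hk : k ∉ ps.map Prod.fst := (List.nodup_cons.mp hnd).1
    have hnd' : (ps.map Prod.fst).Nodup := (List.nodup_cons.mp hnd).2
    have hka : k ∉ a := (hfresh (k, v) (by simp)).1
    have hkb : k ∉ b := (hfresh (k, v) (by simp)).2.1
    have hkc : k ∉ c := (hfresh (k, v) (by simp)).2.2
    have hfr : ∀ q ∈ ps, q.1 ≠ k := by
      intro q hq h
      exact hk (h ▸ List.mem_map_of_mem hq)
    by_cases h1 : v = 1
    · subst h1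
      simp only [List.foldl_cons, Int.reduceBEq, if_true]
      rw [PySem.Set.add_of_not_mem hka]
      rw [ih (a ++ [k]) b c
        (fun q hq => ⟨by
            simp only [List.mem_append, List.mem_singleton]
            rintro (h | h)
            · exact (hfresh q (List.mem_cons_of_mem _ hq)).1 h
            · exact hfr q hq h,
          (hfresh q (List.mem_cons_of_mem _ hq)).2.1,
          (hfresh q (List.mem_cons_of_mem _ hq)).2.2⟩) hnd']
      simp
    · by_cases h3 : v = 3
      · subst h3
        simp only [List.foldl_cons, Int.reduceBEq, Bool.false_eq_true, if_false, if_true]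
        rw [PySem.Set.add_of_not_mem hkb]
        rw [ih a (b ++ [k]) c
          (fun q hq => ⟨(hfresh q (List.mem_cons_of_mem _ hq)).1, by
              simp only [List.mem_append, List.mem_singleton]
              rintro (h | h)
              · exact (hfresh q (List.mem_cons_of_mem _ hq)).2.1 h
              · exact hfr q hq h,
            (hfresh q (List.mem_cons_of_mem _ hq)).2.2⟩) hnd']
        simp
      · simp only [List.foldl_cons]
        rw [show ((k, v).2 == 1) = false from by simpa using h1]
        rw [show ((k, v).2 == 3) = false from by simpa using h3]
        simp only [Bool.false_eq_true, if_false]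
        rw [PySem.Set.add_of_not_mem hkc]
        rw [ih a b (c ++ [k])
          (fun q hq => ⟨(hfresh q (List.mem_cons_of_mem _ hq)).1,
            (hfresh q (List.mem_cons_of_mem _ hq)).2.1, by
              simp only [List.mem_append, List.mem_singleton]
              rintro (h | h)
              · exact (hfresh q (List.mem_cons_of_mem _ hq)).2.2 h
              · exact hfr q hq h⟩) hnd']
        simp [h1, h3]

-- dedup commutes with filter.
theorem pv_ofList_filter (l : List String) (q : String → Bool) :
    PySem.Set.ofList (l.filter q) = (PySem.Set.ofList l).filter q := by
  induction l using List.reverseRecOn with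
  | nil => simp
  | append_singleton l x ih =>
    rw [List.filter_append, PySem.Set.ofList_append_singleton]
    by_cases hq : q x = true
    · rw [show List.filter q [x] = [x] from by simp [hq]]
      rw [PySem.Set.ofList_append_singleton, ih]
      by_cases hx : x ∈ PySem.Set.ofList l
      · rw [PySem.Set.add_of_mem hx,
          PySem.Set.add_of_mem (List.mem_filter.mpr ⟨hx, hq⟩)]
      · rw [PySem.Set.add_of_not_mem hx,
          PySem.Set.add_of_not_mem (fun hmem => hx (List.mem_filter.mp hmem).1),
          List.filter_append]
        simp [hq]
    · have hq' : q x = false := by simpa using hq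
      rw [show List.filter q [x] = [] from by simp [hq'], List.append_nil, ih]
      by_cases hx : x ∈ PySem.Set.ofList l
      · rw [PySem.Set.add_of_mem hx]
      · rw [PySem.Set.add_of_not_mem hx, List.filter_append]
        simp [hq']

-- ===== VERDICT (by name: the statement is the Claim_ definition above) =====
theorem diffLists_spec : Claim_equal_diffLists := by
  intro list1 list2 _
  unfold Spec_diffLists diffLists diffLists_alt
  simp only []
  set s1 := PySem.Set.ofList list1 with hs1
  set s2 := PySem.Set.ofList list2 with hs2
  -- ===== A's value =====
  have h1 := pv_loop_classify s2 s1 PySem.Set.empty PySem.Set.empty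
    (PySem.Set.nodup_ofList list1) (by intro x _ h; simp [PySem.Set.empty] at h)
    (by intro x _ h; simp [PySem.Set.empty] at h)
  have h2 := pv_loop_only_neg s1 s2
    (PySem.Set.empty ++ s1.filter (fun x => PySem.Set.contains s2 x)) PySem.Set.empty
    (PySem.Set.nodup_ofList list2)
    (by
      intro x hx hc
      simp only [PySem.Set.empty, List.nil_append, List.mem_filter]
      refine ⟨by simpa [PySem.Set.contains] using hc, ?_⟩
      simpa [PySem.Set.contains] using hx)
    (by intro x _ h; simp [PySem.Set.empty] at h)
  rw [h1, h2]
  -- ===== B's value =====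
  have hb1 : list1.foldl (fun d x => d.insert x (1:Int)) PySem.Dict.empty
      = PySem.Dict.mk (s1.map (fun x => (x, (1:Int)))) := by
    have := pv_build1 list1 []
    simpa [PySem.Set.update_nil_left] using this
  rw [hb1]
  have hshape : (s1.map (fun x => (x, (1:Int))))
      = s1.map (fun x => (x, if (fun _ : String => false) x then (3:Int) else 1))
        ++ ([] : List String).map (fun x => (x, (2:Int))) := by simp
  rw [hshape]
  have hnduw : (s1 ++ ([] : List String)).Nodup := by
    rw [List.append_nil, hs1]
    exact PySem.Set.nodup_ofList list1
  rw [pv_build2 list2 (fun _ => false) s1 [] hnduw]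
  -- the items of the resulting dict
  have hw2 : PySem.Set.update ([] : List String) (list2.filter (fun y => decide (y ∉ s1)))
      = s2.filter (fun y => !PySem.Set.contains s1 y) := by
    rw [PySem.Set.update_nil_left, pv_ofList_filter]
    apply List.filter_congr
    intro x _
    simp
  rw [hw2]
  have hfresh : ∀ q ∈ (s1.map (fun x => (x, if (false : Bool) || decide (x ∈ list2) then (3:Int) else 1))
      ++ (s2.filter (fun y => !PySem.Set.contains s1 y)).map (fun x => (x, (2:Int)))),
      q.1 ∉ (PySem.Set.empty : PySem.Set String) ∧ q.1 ∉ (PySem.Set.empty : PySem.Set String)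
        ∧ q.1 ∉ (PySem.Set.empty : PySem.Set String) := by
    intro q _
    simp [PySem.Set.empty]
  have hndk : (((s1.map (fun x => (x, if (false : Bool) || decide (x ∈ list2) then (3:Int) else 1))
      ++ (s2.filter (fun y => !PySem.Set.contains s1 y)).map (fun x => (x, (2:Int))))).map Prod.fst).Nodup := by
    simp only [List.map_append, List.map_map]
    have : ∀ (zs : List String) (f : String → Int),
        (zs.map (Prod.fst ∘ fun x => (x, f x))) = zs := by
      intro zs f; simp [Function.comp_def]
    rw [this, this]
    rw [List.nodup_append]
    refine ⟨PySem.Set.nodup_ofList list1, List.Nodup.filter _ (PySem.Set.nodup_ofList list2), ?_⟩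
    intro a ha b hb h
    subst h
    have hthis := (List.mem_filter.mp hb).2
    simp at hthis
    exact hthis ha
  rw [pv_bucket _ PySem.Set.empty PySem.Set.empty PySem.Set.empty hfresh hndk]
  -- component-wise comparison
  simp only [PySem.Set.empty, List.nil_append, List.filter_append, List.filter_map,
    List.map_append, List.map_map]
  congr 1
  · -- list1only
    rw [show ((s2.filter (fun y => !PySem.Set.contains s1 y)).filter
        ((fun q => q.2 == 1) ∘ fun x => (x, (2:Int)))) = [] from by
      simp [Function.comp]]
    simp only [List.map_nil, List.append_nil]
    rw [show ∀ zs : List String, (zs.filter ((fun (q : String × Int) => q.2 == 1) ∘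
        fun x => (x, if (false : Bool) || decide (x ∈ list2) then (3:Int) else 1))).map
        (Prod.fst ∘ fun x => (x, if (false : Bool) || decide (x ∈ list2) then (3:Int) else 1))
        = zs.filter (fun x => !decide (x ∈ list2)) from by
      intro zs
      rw [show (Prod.fst ∘ fun x : String => (x, if (false : Bool) || decide (x ∈ list2) then (3:Int) else 1)) = id from by
        funext x; simp]
      rw [List.map_id]
      apply List.filter_congr
      intro x _
      by_cases h : x ∈ list2 <;> simp [Function.comp, h]]
    apply List.filter_congr
    intro x _
    simp [PySem.Set.contains, hs2, PySem.Set.mem_ofList]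
  congr 1
  · -- both
    rw [show ((s2.filter (fun y => !PySem.Set.contains s1 y)).filter
        ((fun q => q.2 == 3) ∘ fun x => (x, (2:Int)))) = [] from by
      simp [Function.comp]]
    simp only [List.map_nil, List.append_nil]
    rw [show ∀ zs : List String, (zs.filter ((fun (q : String × Int) => q.2 == 3) ∘
        fun x => (x, if (false : Bool) || decide (x ∈ list2) then (3:Int) else 1))).map
        (Prod.fst ∘ fun x => (x, if (false : Bool) || decide (x ∈ list2) then (3:Int) else 1))
        = zs.filter (fun x => decide (x ∈ list2)) from by
      intro zs
      rw [show (Prod.fst ∘ fun x : String => (x, if (false : Bool) || decide (x ∈ list2) then (3:Int) else 1)) = id from by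
        funext x; simp]
      rw [List.map_id]
      apply List.filter_congr
      intro x _
      by_cases h : x ∈ list2 <;> simp [Function.comp, h]]
    apply List.filter_congr
    intro x _
    simp [PySem.Set.contains, hs2, PySem.Set.mem_ofList]
  · -- list2only
    rw [show ∀ zs : List String, (zs.filter ((fun (q : String × Int) => !(q.2 == 1) && !(q.2 == 3)) ∘
        fun x => (x, if (false : Bool) || decide (x ∈ list2) then (3:Int) else 1))) = [] from by
      intro zs
      apply List.filter_eq_nil_iff.mpr
      intro x _
      by_cases h : x ∈ list2 <;> simp [Function.comp, h]]
    simp only [List.map_nil, List.nil_append]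
    rw [show (Prod.fst ∘ fun x : String => (x, (2:Int))) = id from by funext x; rfl,
      List.map_id]
    exact (List.filter_eq_self.mpr (fun x _ => by simp [Function.comp])).symm
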